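-- pv_equiv track=rewrite | github.com/MaxiSack/RNAival | graphs/drawGraphics.py | isHexColour
-- ===== SOURCE A (Python) =====
-- hexToDecDict = {"0":0,"1":1,"2":2,"3":3,"4":4,"5":5,"6":6,"7":7,"8":8,"9":9,"a":10,"b":11,"c":12,"d":13,"e":14,"f":15}
--
-- def isHexColour(string):
-- 	string=string.lower()
-- 	if len(string)!=7:return False
-- 	if not string.startswith("#"): return False
-- 	for c in string[1:]:
-- 		if not c in hexToDecDict:
-- 			return False
-- 	return True
-- ===== SOURCE B (Python) =====
-- HEX = "0123456789abcdef"
-- PATTERN = ["#"] + [HEX] * 6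
--
-- def _match(s, pattern):
--     # tiny pattern engine: consume string and character-class list in lockstep
--     if not pattern:
--         return not s
--     if not s:
--         return False
--     return s[0] in pattern[0] and _match(s[1:], pattern[1:])
--
-- def isHexColour(string):
--     string = string.lower()
--     return _match(string, PATTERN)
-- ===== Notes on version B (the rewrite author's own statement) =====
-- stated objective: alternative
-- what changed: Replaces the guard chain (length check, startswith, per-character dict-membership loop) with a tiny recursive pattern engine that consumes the string and a 7-entry character-class list ('#' plus six hex classes) in lockstep, so length, prefix and digit checks all fall out of one simultaneous recursion.
import Mathlib
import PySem

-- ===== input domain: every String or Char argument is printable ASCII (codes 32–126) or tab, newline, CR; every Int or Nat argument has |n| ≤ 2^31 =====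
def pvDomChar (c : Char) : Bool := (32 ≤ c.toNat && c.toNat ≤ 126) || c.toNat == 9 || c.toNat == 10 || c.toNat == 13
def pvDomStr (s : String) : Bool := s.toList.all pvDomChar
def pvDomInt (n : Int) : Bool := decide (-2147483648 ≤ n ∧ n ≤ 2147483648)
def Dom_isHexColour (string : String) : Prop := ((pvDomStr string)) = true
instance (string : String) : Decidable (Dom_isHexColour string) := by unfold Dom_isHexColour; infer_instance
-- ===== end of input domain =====

-- B replaces the guard chain + membership loop with a tiny recursive pattern engine
-- consuming the string and a 7-entry character-class list in lockstep; alternative, not faster.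


-- ===== PORT A =====
-- module-level constant: hexToDecDict, keyed here by Char (Python iterates a string as
-- one-character strings; a Char key represents those one-character string keys exactly)
def hexToDecDict : PySem.Dict Char Int :=
  PySem.Dict.ofList [('0',0),('1',1),('2',2),('3',3),('4',4),('5',5),('6',6),('7',7),
                     ('8',8),('9',9),('a',10),('b',11),('c',12),('d',13),('e',14),('f',15)]

-- the 'for c in string[1:]' loop with its early 'return False'
def isHexLoopA : List Char → Bool
  | [] => true
  | c :: rest => if !(hexToDecDict.contains c) then false else isHexLoopA rest

def isHexColour (string : String) : Bool :=
  let s := PySem.Str.lower string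
  if PySem.Str.len s ≠ 7 then false
  else if !(PySem.Str.startswith s "#") then false
  else isHexLoopA (PySem.Str.slice s (some 1) none).toList

-- ===== PORT B =====
-- HEX = "0123456789abcdef"
def hexB : List Char := "0123456789abcdef".toList
-- PATTERN = ["#"] + [HEX] * 6  (a list of character classes, each a list of chars)
def patternB : List (List Char) := ['#'] :: List.replicate 6 hexB

-- _match(s, pattern): lockstep consumption of string and class list
def matchB : List Char → List (List Char) → Bool
  | s, [] => s.isEmpty
  | [], _ :: _ => false
  | c :: s, p :: ps => p.contains c && matchB s ps

def isHexColour_alt (string : String) : Bool :=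
  matchB (PySem.Str.lower string).toList patternB

-- ===== PRECONDITION & SPEC =====
def Spec_isHexColour (string : String) (out : Bool) : Prop := out = isHexColour_alt string
instance (string : String) (out : Bool) : Decidable (Spec_isHexColour string out) := by unfold Spec_isHexColour; infer_instance

-- ===== CLAIM (what is proved, stated in full; the proofs are below) =====
def Claim_equal_isHexColour : Prop := ∀ (string : String), Dom_isHexColour string → Spec_isHexColour string (isHexColour string)

-- ===== LEMMAS AND PROOFS =====

lemma containsHex_iff (c : Char) :
    hexToDecDict.contains c = true ↔ c ∈ hexB := by
  have h : hexToDecDict.contains c = (hexB.any (· == c)) := by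
    have h1 : hexToDecDict = PySem.Dict.mk [('0',0),('1',1),('2',2),('3',3),('4',4),('5',5),
        ('6',6),('7',7),('8',8),('9',9),('a',10),('b',11),('c',12),('d',13),('e',14),('f',15)] := rfl
    rw [h1, PySem.Dict.contains_mk]
    rfl
  rw [h, List.any_beq']
  simp

lemma loopA_iff (r : List Char) :
    isHexLoopA r = true ↔ ∀ x ∈ r, x ∈ hexB := by
  induction r with
  | nil => simp [isHexLoopA]
  | cons c rest ih => simp [isHexLoopA, containsHex_iff, ih]

lemma matchRep_iff (n : Nat) (s : List Char) :
    matchB s (List.replicate n hexB) = true ↔ (s.length = n ∧ ∀ x ∈ s, x ∈ hexB) := by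
  induction n generalizing s with
  | zero => cases s <;> simp [matchB]
  | succ m ih =>
      cases s with
      | nil => simp [List.replicate_succ, matchB]
      | cons c t =>
          simp only [List.replicate_succ, matchB, Bool.and_eq_true, ih, List.contains_eq_mem,
            decide_eq_true_eq, List.length_cons, List.mem_cons]
          constructor
          · rintro ⟨hc, hlen, hall⟩
            exact ⟨by omega, fun x hx => hx.elim (fun h => h ▸ hc) (hall x)⟩
          · rintro ⟨hlen, hall⟩
            exact ⟨hall c (Or.inl rfl), by omega, fun x hx => hall x (Or.inr hx)⟩

-- ===== VERDICT (by name: the statement is the Claim_ definition above) =====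
theorem isHexColour_spec : Claim_equal_isHexColour := by
  intro string _
  unfold Spec_isHexColour isHexColour isHexColour_alt
  simp only []
  rcases hl : (PySem.Str.lower string).toList with _ | ⟨c, t⟩
  · have h7 : PySem.Str.len (PySem.Str.lower string) = 0 := by
      rw [PySem.Str.len_eq, hl]; rfl
    have hb : matchB [] patternB = false := rfl
    rw [h7, hb]
    norm_num
  · have hlen : PySem.Str.len (PySem.Str.lower string) = (1 : Int) + t.length := by
      rw [PySem.Str.len_eq, hl]; simp; omega
    have hsw : PySem.Str.startswith (PySem.Str.lower string) "#" = (c == '#') := by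
      rw [PySem.Str.startswith_eq, hl]
      rw [Bool.eq_iff_iff, PySem.Chars.startswith_iff]
      have : "#".toList = ['#'] := rfl
      rw [this]
      simp only [List.cons_prefix_cons, List.nil_prefix, and_true, beq_iff_eq]
      exact eq_comm
    have hslice : (PySem.Str.slice (PySem.Str.lower string) (some 1) none).toList = t := by
      rw [PySem.Str.toList_slice, PySem.Chars.slice_eq_listSlice,
        PySem.List.slice_from _ (by norm_num), hl]
      rfl
    have hmb : matchB (c :: t) patternB
        = ((['#'] : List Char).contains c && matchB t (List.replicate 6 hexB)) := rfl
    have hcc : (['#'] : List Char).contains c = (c == '#') := by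
      rw [Bool.eq_iff_iff]
      simp [List.contains_eq_mem]
    rw [hlen, hsw, hslice, hmb, hcc]
    clear hl hsw hslice hmb hcc
    by_cases h7 : t.length = 6
    · have h7' : ¬ ((1 : Int) + t.length ≠ 7) := by omega
      rw [if_neg h7']
      by_cases hc : c = '#'
      · simp only [hc, beq_self_eq_true, Bool.not_true, Bool.true_and]
        rw [if_neg (by simp)]
        rw [Bool.eq_iff_iff, loopA_iff, matchRep_iff]
        tauto
      · simp [hc]
    · rw [if_pos (by omega)]
      have hmf : matchB t (List.replicate 6 hexB) = false := by
        rw [Bool.eq_false_iff]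
        intro hmt
        exact h7 (matchRep_iff 6 t |>.mp hmt).1
      rw [hmf]
      simp
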